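-- pv_equiv track=rewrite | github.com/hyerynn0521/CodePath-SE101 | Week 1/countLongestAscending.py | countLongestAscending
-- ===== SOURCE A (Python) =====
-- def countLongestAscending(number_array):
-- # Write your code here
--   ascending = 1
--   longest = 0
--   for i in range(1, len(number_array)):
--     if number_array[i] > number_array[i-1]:
--       ascending = ascending + 1
--     if ascending > longest:
--       longest = ascending
--     elif not number_array[i] > number_array[i-1]:
--       ascending = 1
--   return longest
-- ===== SOURCE B (Python) =====
-- def countLongestAscending(number_array):
--     # Boundary-table decomposition: collect run-start indices, then take the max gap.
--     n = len(number_array)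
--     if n < 2:
--         return 0
--     starts = [0] + [i for i in range(1, n) if number_array[i] <= number_array[i - 1]] + [n]
--     return max(starts[k + 1] - starts[k] for k in range(len(starts) - 1))
-- ===== Notes on version B (the rewrite author's own statement) =====
-- stated objective: alternative
-- what changed: Replaces the single-pass running-counter scan (ascending/longest state machine) by a two-phase boundary-table computation: first build the table of run-start indices (0, each break position, n), then take the maximum adjacent gap of that table.
import Mathlib
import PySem

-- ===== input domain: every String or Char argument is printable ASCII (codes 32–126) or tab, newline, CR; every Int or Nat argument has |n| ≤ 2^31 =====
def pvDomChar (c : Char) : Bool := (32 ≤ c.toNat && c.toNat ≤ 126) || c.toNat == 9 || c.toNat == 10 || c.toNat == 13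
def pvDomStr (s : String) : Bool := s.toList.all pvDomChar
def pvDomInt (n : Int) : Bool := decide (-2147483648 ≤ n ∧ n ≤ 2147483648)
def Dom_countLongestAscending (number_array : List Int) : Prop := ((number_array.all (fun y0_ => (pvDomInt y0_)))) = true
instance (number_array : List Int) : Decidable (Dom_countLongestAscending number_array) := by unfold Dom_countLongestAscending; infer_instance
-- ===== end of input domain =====

-- B replaces A's running-counter scan by a boundary table (run-start indices) plus a max-gap pass; alternative decomposition, same cost.

-- ===== PORT A =====
-- one-pass state machine over i = 1 .. n-1 with state (ascending, longest); indices are always in range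
def countLongestAscending (number_array : List Int) : Int :=
  ((PySem.List.pyRange 1 (number_array.length : Int) 1).foldl
    (fun (s : Int × Int) i =>
      let ascending :=
        if PySem.List.pyGetD number_array i 0 > PySem.List.pyGetD number_array (i-1) 0
        then s.1 + 1 else s.1
      if ascending > s.2 then (ascending, ascending)
      else if ¬ (PySem.List.pyGetD number_array i 0 > PySem.List.pyGetD number_array (i-1) 0)
      then (1, s.2) else (ascending, s.2))
    (1, 0)).2

-- ===== PORT B =====
-- Source B: guard n < 2, build starts = [0] + break positions + [n], answer = max adjacent gap
def countLongestAscending_alt (number_array : List Int) : Int :=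
  let n : Int := number_array.length
  if n < 2 then 0
  else
    let starts : List Int :=
      0 :: ((PySem.List.pyRange 1 n 1).filter
              (fun i => decide (PySem.List.pyGetD number_array i 0 ≤ PySem.List.pyGetD number_array (i-1) 0))
            ++ [n])
    let gaps : List Int :=
      (PySem.List.pyRange 0 ((starts.length : Int) - 1) 1).map
        (fun k => PySem.List.pyGetD starts (k+1) 0 - PySem.List.pyGetD starts k 0)
    -- Python's max over a nonempty sequence: first element as accumulator (gaps is nonempty here)
    match gaps with
    | [] => 0
    | x :: t => t.foldl max x

-- ===== PRECONDITION & SPEC =====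
def Spec_countLongestAscending (number_array : List Int) (out : Int) : Prop := out = countLongestAscending_alt number_array
instance (number_array : List Int) (out : Int) : Decidable (Spec_countLongestAscending number_array out) := by unfold Spec_countLongestAscending; infer_instance

-- ===== CLAIM (what is proved, stated in full; the proofs are below) =====
def Claim_equal_countLongestAscending : Prop := ∀ (number_array : List Int), Dom_countLongestAscending number_array → Spec_countLongestAscending number_array (countLongestAscending number_array)

-- ===== LEMMAS AND PROOFS =====

-- break booleans: brks[j] = true iff arr[j+1] ≤ arr[j]
def pvBrks (xs : List Int) : List Bool :=
  List.zipWith (fun a b => decide (b ≤ a)) xs xs.tail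

-- A's step as a function of the break boolean
def pvStepA (s : Int × Int) (br : Bool) : Int × Int :=
  let ascending := if br then s.1 else s.1 + 1
  if ascending > s.2 then (ascending, ascending)
  else if br then (1, s.2) else (ascending, s.2)

-- simplified step, valid on states with 1 ≤ a ≤ l
def pvStep (s : Int × Int) (br : Bool) : Int × Int :=
  if br then (1, s.2) else (s.1 + 1, max s.2 (s.1 + 1))

-- break positions (1-based) of a break-boolean list
def pvPos (bs : List Bool) : List Int :=
  (PySem.List.pyRange 1 ((bs.length : Int) + 1) 1).filter (fun i => bs.getD (i-1).toNat false)

def pvStarts (bs : List Bool) : List Int := 0 :: (pvPos bs ++ [(bs.length : Int) + 1])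

-- adjacent differences
def pvAdj (l : List Int) : List Int := List.zipWith (fun a b => b - a) l l.tail

def pvD (bs : List Bool) : List Int := pvAdj (pvStarts bs)

theorem pvAdj_append_singleton (l : List Int) (h : l ≠ []) (x : Int) :
    pvAdj (l ++ [x]) = pvAdj l ++ [x - l.getLast h] := by
  induction l with
  | nil => exact absurd rfl h
  | cons a t ih =>
    cases t with
    | nil => simp [pvAdj]
    | cons b t' =>
      have := ih (by simp)
      simp only [pvAdj, List.cons_append, List.tail_cons, List.zipWith_cons_cons] at this ⊢
      rw [show (a :: b :: t' : List Int).getLast h = (b :: t').getLast (by simp) from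
        List.getLast_cons (by simp)]
      simpa using this

theorem pvPos_append (bs : List Bool) (b : Bool) :
    pvPos (bs ++ [b]) = pvPos bs ++ (if b then [(bs.length : Int) + 1] else []) := by
  unfold pvPos
  have hsplit : PySem.List.pyRange 1 (((bs ++ [b]).length : Int) + 1) 1
      = PySem.List.pyRange 1 ((bs.length : Int) + 1) 1 ++ [(bs.length : Int) + 1] := by
    simp only [List.length_append, List.length_cons, List.length_nil]
    push_cast
    rw [PySem.List.pyRange_one_succ_right (by omega)]
  rw [hsplit, List.filter_append]
  congr 1
  · apply List.filter_congr
    intro i hi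
    have hmem := (PySem.List.mem_pyRange_one).1 hi
    have hlt : (i - 1).toNat < bs.length := by omega
    simp only [List.getD_eq_getElem?_getD]
    rw [List.getElem?_append_left hlt]
  · have h1 : ((bs.length : Int) + 1 - 1).toNat = bs.length := by omega
    have h2 : (bs ++ [b]).getD bs.length false = b := by
      simp [List.getD_eq_getElem?_getD]
    cases b <;> simp only [List.filter_cons, List.filter_nil, h1, h2, if_true, if_false]

theorem pvStarts_ne_nil (bs : List Bool) : pvStarts bs ≠ [] := by simp [pvStarts]

theorem pvStarts_getLast (bs : List Bool) (h : pvStarts bs ≠ []) :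
    (pvStarts bs).getLast h = (bs.length : Int) + 1 := by
  have h1 : (pvStarts bs).getLast? = some ((bs.length : Int) + 1) := by
    unfold pvStarts
    rw [show (0 :: (pvPos bs ++ [(bs.length : Int) + 1]))
        = (0 :: pvPos bs) ++ [(bs.length : Int) + 1] by simp,
      List.getLast?_concat]
  rw [List.getLast?_eq_some_getLast h] at h1
  exact Option.some.inj h1

-- the main invariant, by right induction on the break list
theorem pvMain (bs : List Bool) :
    ∃ D₀ : List Int,
      pvD bs = D₀ ++ [(bs.foldl pvStep (1,1)).1] ∧
      (bs.foldl pvStep (1,1)).2 = (pvD bs).foldl max 1 ∧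
      (∀ y ∈ pvD bs, 1 ≤ y) := by
  induction bs using List.reverseRecOn with
  | nil => exact ⟨[], by decide, by decide, by decide⟩
  | append_singleton bs b ih =>
    obtain ⟨D₀, hD, hM, hall⟩ := ih
    have hne : pvStarts bs ≠ [] := pvStarts_ne_nil bs
    have hlast := pvStarts_getLast bs hne
    set a := (bs.foldl pvStep (1,1)).1 with ha
    set l := (bs.foldl pvStep (1,1)).2 with hl
    have hfold : (bs ++ [b]).foldl pvStep (1,1) = pvStep (a, l) b := by
      rw [List.foldl_append]; simp [ha, hl]
    have ha1 : 1 ≤ a := hall a (by rw [hD]; simp)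
    have hl1 : 1 ≤ l := by
      rw [hM]; exact (PySem.List.le_foldl_max _ _).1
    cases b with
    | false =>
      -- no break: the boundary table keeps the same break positions, only the endpoint grows
      have hstarts : pvStarts (bs ++ [false]) = (0 :: pvPos bs) ++ [(bs.length : Int) + 2] := by
        unfold pvStarts
        rw [pvPos_append]
        simp only [if_neg (by decide : ¬(false = true)), List.append_nil,
          List.length_append, List.length_cons, List.length_nil]
        rw [show (((bs.length + (0+1) : Nat)) : Int) + 1 = (bs.length : Int) + 2 by push_cast; ring]
        simp
      have hstartsold : pvStarts bs = (0 :: pvPos bs) ++ [(bs.length : Int) + 1] := by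
        simp [pvStarts]
      have hne0 : (0 :: pvPos bs : List Int) ≠ [] := by simp
      have hDold : pvD bs
          = pvAdj (0 :: pvPos bs) ++ [(bs.length : Int) + 1 - (0 :: pvPos bs).getLast hne0] := by
        unfold pvD
        rw [hstartsold, pvAdj_append_singleton _ hne0]
      have hDnew : pvD (bs ++ [false])
          = pvAdj (0 :: pvPos bs) ++ [(bs.length : Int) + 2 - (0 :: pvPos bs).getLast hne0] := by
        unfold pvD
        rw [hstarts, pvAdj_append_singleton _ hne0]
      have hinj := List.append_inj' (hD.symm.trans hDold) (by simp)
      have hD₀ : D₀ = pvAdj (0 :: pvPos bs) := hinj.1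
      have haval : a = (bs.length : Int) + 1 - (0 :: pvPos bs).getLast hne0 := by
        have := hinj.2; simpa using this
      have hDnew' : pvD (bs ++ [false]) = D₀ ++ [a + 1] := by
        rw [hDnew, hD₀]
        congr 2
        rw [haval]; ring
      refine ⟨D₀, ?_, ?_, ?_⟩
      · rw [hfold]
        simpa [pvStep] using hDnew'
      · rw [hfold]
        have h2 : (pvStep (a, l) false).2 = max l (a + 1) := rfl
        rw [h2, hDnew', List.foldl_append, hM, hD, List.foldl_append]
        simp only [List.foldl_cons, List.foldl_nil]
        rw [max_assoc]
        congr 1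
        exact max_eq_right (by omega)
      · intro y hy
        rw [hDnew'] at hy
        rcases List.mem_append.1 hy with hmem | hmem
        · exact hall y (by rw [hD]; exact List.mem_append_left _ hmem)
        · simp at hmem; omega
    | true =>
      -- break: a new run starts; the table gains a start and the last segment has length 1
      have hstarts : pvStarts (bs ++ [true]) = pvStarts bs ++ [(bs.length : Int) + 2] := by
        unfold pvStarts
        rw [pvPos_append]
        simp only [List.length_append, List.length_cons, List.length_nil]
        rw [show (((bs.length + (0+1) : Nat)) : Int) + 1 = (bs.length : Int) + 2 by push_cast; ring]
        simp
      have hDnew : pvD (bs ++ [true]) = pvD bs ++ [1] := by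
        unfold pvD
        rw [hstarts, pvAdj_append_singleton _ hne, hlast]
        congr 2
        ring
      refine ⟨pvD bs, ?_, ?_, ?_⟩
      · rw [hfold]
        simpa [pvStep] using hDnew
      · rw [hfold]
        have h2 : (pvStep (a, l) true).2 = l := rfl
        rw [h2, hDnew, List.foldl_append, ← hM]
        simp only [List.foldl_cons, List.foldl_nil]
        exact (max_eq_left hl1).symm
      · intro y hy
        rw [hDnew] at hy
        rcases List.mem_append.1 hy with hmem | hmem
        · exact hall y hmem
        · simp at hmem; omega

-- pvStepA agrees with pvStep on invariant states, and preserves the invariant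
theorem pvStepA_eq (a l : Int) (_ha : 1 ≤ a) (hal : a ≤ l) (br : Bool) :
    pvStepA (a, l) br = pvStep (a, l) br := by
  cases br with
  | true =>
    have h1 : ¬ (a > l) := by omega
    simp [pvStepA, pvStep, h1]
  | false =>
    by_cases h : a + 1 > l
    · simp [pvStepA, pvStep, h, max_eq_right (by omega : l ≤ a + 1)]
    · simp [pvStepA, pvStep, h, max_eq_left (by omega : a + 1 ≤ l)]

theorem pvStep_inv (a l : Int) (ha : 1 ≤ a) (hal : a ≤ l) (br : Bool) :
    1 ≤ (pvStep (a, l) br).1 ∧ (pvStep (a, l) br).1 ≤ (pvStep (a, l) br).2 := by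
  cases br <;> simp [pvStep] <;> omega

theorem pvFoldA_eq (bs : List Bool) (a l : Int) (ha : 1 ≤ a) (hal : a ≤ l) :
    bs.foldl pvStepA (a, l) = bs.foldl pvStep (a, l) := by
  induction bs generalizing a l with
  | nil => rfl
  | cons b t ih =>
    simp only [List.foldl_cons]
    rw [pvStepA_eq a l ha hal b]
    obtain ⟨h1, h2⟩ := pvStep_inv a l ha hal b
    have hrw : pvStep (a, l) b = ((pvStep (a, l) b).1, (pvStep (a, l) b).2) := rfl
    rw [hrw] at h1 h2 ⊢
    exact ih _ _ h1 h2

-- first A step from (1,0) equals the simplified step from (1,1)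
theorem pvFirstStep (b : Bool) : pvStepA (1, 0) b = pvStep (1, 1) b := by
  cases b <;> decide

theorem pvFoldA_init (bs : List Bool) (h : bs ≠ []) :
    bs.foldl pvStepA (1, 0) = bs.foldl pvStep (1, 1) := by
  cases bs with
  | nil => exact absurd rfl h
  | cons b t =>
    simp only [List.foldl_cons, pvFirstStep]
    obtain ⟨h1, h2⟩ := pvStep_inv 1 1 (by norm_num) (by norm_num) b
    have hrw : pvStep (1, 1) b = ((pvStep (1, 1) b).1, (pvStep (1, 1) b).2) := rfl
    rw [hrw] at h1 h2 ⊢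
    exact pvFoldA_eq t _ _ h1 h2

theorem pvBrks_length (xs : List Int) : (pvBrks xs).length = xs.length - 1 := by
  simp [pvBrks]

-- bridge: A's pyRange/pyGetD comparisons, listed in order, are the break booleans
theorem pvMap_brks (xs : List Int) :
    (PySem.List.pyRange 1 (xs.length : Int) 1).map
        (fun i => decide (PySem.List.pyGetD xs i 0 ≤ PySem.List.pyGetD xs (i-1) 0))
      = pvBrks xs := by
  apply List.ext_getElem
  · simp [pvBrks_length, PySem.List.length_pyRange_one]
  · intro j h1 h2
    simp only [List.getElem_map]
    have hlen : (PySem.List.pyRange 1 (xs.length : Int) 1).length = xs.length - 1 := by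
      simp [PySem.List.length_pyRange_one]
    simp only [List.length_map] at h1
    rw [hlen] at h1
    have hj1 : j + 1 < xs.length := by omega
    have hval : (PySem.List.pyRange 1 (xs.length : Int) 1)[j] = 1 + (j : Int) :=
      PySem.List.getElem_pyRange_one ..
    rw [hval]
    have hget1 : PySem.List.pyGetD xs (1 + (j : Int)) 0 = xs[j+1] := by
      rw [PySem.List.pyGetD_eq_getElem _ _ (by omega) (by push_cast; omega)]
      congr 1 <;> omega
    have hget0 : PySem.List.pyGetD xs (1 + (j : Int) - 1) 0 = xs[j]'(by omega) := by
      rw [PySem.List.pyGetD_eq_getElem _ _ (by omega) (by push_cast; omega)]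
      congr 1 <;> omega
    rw [hget1, hget0]
    simp only [pvBrks, List.getElem_zipWith, List.getElem_tail]

theorem pvA_fold (xs : List Int) :
    countLongestAscending xs = ((pvBrks xs).foldl pvStepA (1, 0)).2 := by
  unfold countLongestAscending
  rw [← pvMap_brks, List.foldl_map]
  congr 1
  apply PySem.List.foldl_congr_mem
  intro s i hi
  by_cases h : PySem.List.pyGetD xs i 0 > PySem.List.pyGetD xs (i-1) 0
  · simp [pvStepA, h, not_le.2 h]
  · simp [pvStepA, h, not_lt.1 h]

-- bridge: B's filtered pyRange is pvPos of the break booleans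
theorem pvFilter_pos (xs : List Int) :
    (PySem.List.pyRange 1 (xs.length : Int) 1).filter
        (fun i => decide (PySem.List.pyGetD xs i 0 ≤ PySem.List.pyGetD xs (i-1) 0))
      = pvPos (pvBrks xs) := by
  unfold pvPos
  have hlen : ((pvBrks xs).length : Int) + 1 = (xs.length : Int) ∨ xs = [] := by
    cases xs with
    | nil => right; rfl
    | cons x t => left; rw [pvBrks_length]; simp
  rcases hlen with hlen | rfl
  · rw [hlen]
    apply List.filter_congr
    intro i hi
    have hmem := (PySem.List.mem_pyRange_one).1 hi
    have hjn : (i - 1).toNat < (pvBrks xs).length := by rw [pvBrks_length]; omega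
    rw [List.getD_eq_getElem _ _ hjn]
    simp only [pvBrks, List.getElem_zipWith, List.getElem_tail]
    have hget1 : PySem.List.pyGetD xs i 0 = xs[(i-1).toNat + 1]'(by rw [pvBrks_length] at hjn; omega) := by
      rw [PySem.List.pyGetD_eq_getElem _ _ (by omega) (by omega)]
      congr 1 <;> omega
    have hget0 : PySem.List.pyGetD xs (i - 1) 0 = xs[(i-1).toNat]'(by rw [pvBrks_length] at hjn; omega) := by
      rw [PySem.List.pyGetD_eq_getElem _ _ (by omega) (by omega)]
    rw [hget1, hget0]
  · rfl

-- bridge: B's indexed gap list is the adjacent-difference list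
theorem pvGaps_eq_adj (starts : List Int) :
    (PySem.List.pyRange 0 ((starts.length : Int) - 1) 1).map
        (fun k => PySem.List.pyGetD starts (k+1) 0 - PySem.List.pyGetD starts k 0)
      = pvAdj starts := by
  apply List.ext_getElem
  · simp [pvAdj, PySem.List.length_pyRange_one]
  · intro j h1 h2
    simp only [List.getElem_map]
    have hlen : (PySem.List.pyRange 0 ((starts.length : Int) - 1) 1).length = starts.length - 1 := by
      simp [PySem.List.length_pyRange_one]
    simp only [List.length_map] at h1
    rw [hlen] at h1
    have hval : (PySem.List.pyRange 0 ((starts.length : Int) - 1) 1)[j] = 0 + (j : Int) :=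
      PySem.List.getElem_pyRange_one ..
    rw [hval]
    have hj1 : j + 1 < starts.length := by omega
    have hA : PySem.List.pyGetD starts (0 + (j:Int) + 1) 0 = starts[j+1] := by
      rw [PySem.List.pyGetD_eq_getElem _ _ (by omega) (by push_cast; omega)]
      congr 1 <;> omega
    have hB : PySem.List.pyGetD starts (0 + (j:Int)) 0 = starts[j]'(by omega) := by
      rw [PySem.List.pyGetD_eq_getElem _ _ (by omega) (by push_cast; omega)]
      congr 1 <;> omega
    rw [hA, hB]
    simp only [pvAdj, List.getElem_zipWith, List.getElem_tail]

-- ===== VERDICT (by name: the statement is the Claim_ definition above) =====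
theorem countLongestAscending_spec : Claim_equal_countLongestAscending := by
  intro xs _
  unfold Spec_countLongestAscending
  by_cases hn : (xs.length : Int) < 2
  · -- n < 2: A's loop is empty and longest stays 0; B's guard returns 0
    have hr : PySem.List.pyRange 1 (xs.length : Int) 1 = [] :=
      PySem.List.pyRange_one_eq_nil (by omega)
    unfold countLongestAscending countLongestAscending_alt
    rw [hr]
    simp [hn]
  · have h2 : 2 ≤ xs.length := by omega
    have hbne : pvBrks xs ≠ [] := by
      intro hcon
      have hlen := pvBrks_length xs
      rw [hcon] at hlen
      simp only [List.length_nil] at hlen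
      omega
    -- A side
    rw [pvA_fold, pvFoldA_init _ hbne]
    obtain ⟨D₀, hD, hM, hall⟩ := pvMain (pvBrks xs)
    rw [hM]
    -- B side
    unfold countLongestAscending_alt
    simp only [if_neg hn]
    rw [pvFilter_pos xs]
    have hstarts : (0 :: (pvPos (pvBrks xs) ++ [(xs.length : Int)])) = pvStarts (pvBrks xs) := by
      unfold pvStarts
      have hlen : ((pvBrks xs).length : Int) + 1 = (xs.length : Int) := by
        rw [pvBrks_length]; push_cast; omega
      rw [hlen]
    rw [hstarts, pvGaps_eq_adj]
    have hDval : pvAdj (pvStarts (pvBrks xs)) = pvD (pvBrks xs) := rfl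
    rw [hDval]
    cases hcase : pvD (pvBrks xs) with
    | nil =>
      exfalso
      rw [hcase] at hD
      exact absurd hD.symm (by simp)
    | cons x t =>
      have hx : 1 ≤ x := hall x (by rw [hcase]; simp)
      show List.foldl max 1 (x :: t) = List.foldl max x t
      simp only [List.foldl_cons]
      rw [max_eq_right hx]
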